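-- pv_equiv track=rewrite | github.com/raulivan/brcris-parser | src/util/text_validator.py | validar_titulo
-- ===== SOURCE A (Python) =====
-- def validar_titulo(titulo) -> bool:
--     """
--     Método que valida se um título é cosniderado válidos
--
--     :param titulo: titulo da publicação
--     """
--     if titulo is None:
--         return False
--
--     if titulo == None:
--         return False
--
--     titulo = str(titulo).strip()
--
--     if titulo == '':
--         return False
--
--     tokens = titulo.split(" ")
--
--     token_validos_count = 0
--
--     for t in tokens:
--         if len(t.strip()) > 0:
--             token_validos_count += 1
--         if token_validos_count > 3:
--             break
--
--     return token_validos_count > 0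
-- ===== SOURCE B (Python) =====
-- def validar_titulo(titulo) -> bool:
--     """
--     Método que valida se um título é cosniderado válidos
--
--     :param titulo: titulo da publicação
--     """
--     if titulo is None:
--         return False
--
--     if titulo == None:
--         return False
--
--     return str(titulo).strip() != ''
-- ===== Notes on version B (the rewrite author's own statement) =====
-- stated objective: simpler
-- what changed: B replaces A's split-on-space token loop with counter and early break by a single closed-form emptiness check on the stripped string (a stripped non-empty string always starts with a non-whitespace char, so its first token is always valid).
import Mathlib
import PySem

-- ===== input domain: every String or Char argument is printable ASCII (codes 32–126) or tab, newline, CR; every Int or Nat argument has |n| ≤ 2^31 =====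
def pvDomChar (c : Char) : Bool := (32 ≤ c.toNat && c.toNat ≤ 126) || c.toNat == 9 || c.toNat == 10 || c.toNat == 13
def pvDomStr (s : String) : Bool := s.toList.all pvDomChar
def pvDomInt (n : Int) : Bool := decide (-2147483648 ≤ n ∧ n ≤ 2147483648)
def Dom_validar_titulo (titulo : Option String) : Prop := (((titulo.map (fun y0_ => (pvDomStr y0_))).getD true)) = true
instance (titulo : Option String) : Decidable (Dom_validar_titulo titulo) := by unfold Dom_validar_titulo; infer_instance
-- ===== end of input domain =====

-- B replaces A's split-on-space token-counting loop by a closed-form emptiness check of the stripped title; objective: simpler.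

-- ===== PORT A =====
-- the 'for t in tokens' loop with its counter and 'break' at count > 3
def pvLoopA : List String → Int → Int
  | [], c => c
  | t :: ts, c =>
    let c' := if 0 < PySem.Str.len (PySem.Str.strip t) then c + 1 else c
    if 3 < c' then c' else pvLoopA ts c'

def validar_titulo (titulo : Option String) : Bool :=
  match titulo with
  | none => false      -- 'titulo is None' (and the redundant 'titulo == None', the same test on Option String)
  | some s =>
    let t := PySem.Str.strip s     -- str(titulo) is the identity on a str
    if t = "" then false
    else
      let tokens := (PySem.Str.split? t " ").getD []   -- sep " " ≠ "": split? is always some here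
      decide (0 < pvLoopA tokens 0)

-- ===== PORT B =====
def validar_titulo_alt (titulo : Option String) : Bool :=
  match titulo with
  | none => false      -- 'titulo is None' / 'titulo == None'
  | some s => decide (PySem.Str.strip s ≠ "")

-- ===== PRECONDITION & SPEC =====
def Spec_validar_titulo (titulo : Option String) (out : Bool) : Prop := out = validar_titulo_alt titulo
instance (titulo : Option String) (out : Bool) : Decidable (Spec_validar_titulo titulo out) := by unfold Spec_validar_titulo; infer_instance

-- ===== CLAIM (what is proved, stated in full; the proofs are below) =====
def Claim_equal_validar_titulo : Prop := ∀ (titulo : Option String), Dom_validar_titulo titulo → Spec_validar_titulo titulo (validar_titulo titulo)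

-- ===== LEMMAS AND PROOFS =====

-- the loop never decreases its counter
lemma pvLoopA_ge (ts : List String) (c : Int) : c ≤ pvLoopA ts c := by
  induction ts generalizing c with
  | nil => simp [pvLoopA]
  | cons t ts ih =>
    simp only [pvLoopA]
    split_ifs with h1 h2 h3 <;> first
      | omega
      | (exact le_trans (by omega) (ih _))

-- a token with non-empty strip makes the loop's result positive
lemma pvLoopA_pos (ts : List String) (t : String) (ht : t ∈ ts)
    (hv : 0 < PySem.Str.len (PySem.Str.strip t)) : 0 < pvLoopA ts 0 := by
  induction ts with
  | nil => cases ht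
  | cons a ts ih =>
    rcases List.mem_cons.mp ht with rfl | hmem
    · simp only [pvLoopA, hv, if_pos]
      have := pvLoopA_ge ts (0 + 1 : Int)
      split_ifs <;> omega
    · simp only [pvLoopA]
      split_ifs with h1 h2 h3
      · omega
      · have := pvLoopA_ge ts (0 + 1 : Int); omega
      · omega
      · exact ih hmem

-- every character of the input (or of the pending pieces) that is not a separator character
-- ends up inside some output token of splitOn.go
lemma go_mem (sep : List Char) (fuel : Nat) (l cur : List Char) (acc : List (List Char)) (c : Char)
    (hc : c ∈ l ∨ c ∈ cur ∨ ∃ tok ∈ acc, c ∈ tok) (hcs : c ∉ sep) :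
    ∃ tok ∈ PySem.Chars.splitOn.go sep fuel l cur acc, c ∈ tok := by
  induction fuel generalizing l cur acc with
  | zero =>
    simp only [PySem.Chars.splitOn.go]
    rcases hc with h | h | ⟨tok, htok, hcin⟩
    · exact ⟨cur.reverse ++ l, by simp, by simp [h]⟩
    · exact ⟨cur.reverse ++ l, by simp, by simp [h]⟩
    · exact ⟨tok, by simp [htok], hcin⟩
  | succ n ih =>
    cases l with
    | nil =>
      simp only [PySem.Chars.splitOn.go]
      rcases hc with h | h | ⟨tok, htok, hcin⟩
      · cases h
      · exact ⟨cur.reverse, by simp, by simp [h]⟩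
      · exact ⟨tok, by simp [htok], hcin⟩
    | cons a rest =>
      by_cases hp : sep.isPrefixOf (a :: rest)
      · have hpre : sep <+: (a :: rest) := List.isPrefixOf_iff_prefix.mp hp
        obtain ⟨u, hu⟩ := hpre
        simp only [PySem.Chars.splitOn.go, hp, if_pos]
        apply ih
        rcases hc with h | h | ⟨tok, htok, hcin⟩
        · left
          rw [← hu] at h ⊢
          rw [List.drop_left]
          rcases List.mem_append.mp h with h' | h'
          · exact absurd h' hcs
          · exact h'
        · right; right; exact ⟨cur.reverse, by simp, by simp [h]⟩
        · right; right; exact ⟨tok, by simp [htok], hcin⟩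
      · simp only [PySem.Chars.splitOn.go, hp]
        apply ih
        rcases hc with h | h | ⟨tok, htok, hcin⟩
        · rcases List.mem_cons.mp h with rfl | h'
          · right; left; simp
          · left; exact h'
        · right; left; exact List.mem_cons_of_mem _ h
        · right; right; exact ⟨tok, htok, hcin⟩

lemma mem_splitOn (sep s : List Char) (c : Char) (hc : c ∈ s) (hcs : c ∉ sep) :
    ∃ tok ∈ PySem.Chars.splitOn s sep, c ∈ tok := by
  unfold PySem.Chars.splitOn
  exact go_mem sep (s.length + 1) s [] [] c (Or.inl hc) hcs

-- rstrip = [] forces every character to be whitespace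
lemma all_space_of_rstrip_nil (l : List Char)
    (h : PySem.Chars.rstrip l = []) : ∀ c ∈ l, PySem.Chars.isspace c := by
  intro c hcl
  have h' : List.dropWhile PySem.Chars.isspace l.reverse = [] := by
    have := congrArg List.reverse h
    simpa [PySem.Chars.rstrip] using this
  have := List.dropWhile_eq_nil_iff.mp h' c (List.mem_reverse.mpr hcl)
  exact this

-- a string whose strip is empty is all whitespace
lemma all_space_of_strip_nil (l : List Char)
    (h : PySem.Chars.strip l = []) : ∀ c ∈ l, PySem.Chars.isspace c := by
  intro c hcl
  have hl : ∀ c ∈ PySem.Chars.lstrip l, PySem.Chars.isspace c :=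
    all_space_of_rstrip_nil _ h
  have hsplit : List.takeWhile PySem.Chars.isspace l ++ List.dropWhile PySem.Chars.isspace l = l :=
    List.takeWhile_append_dropWhile
  rw [← hsplit] at hcl
  rcases List.mem_append.mp hcl with h' | h'
  · exact List.mem_takeWhile_imp h'
  · exact hl c h'

-- a non-empty strip contains a non-whitespace character
lemma exists_not_space_of_strip_ne_nil (l : List Char)
    (h : PySem.Chars.strip l ≠ []) :
    ∃ c ∈ PySem.Chars.strip l, ¬ PySem.Chars.isspace c := by
  unfold PySem.Chars.strip PySem.Chars.rstrip at *
  cases hd : List.dropWhile PySem.Chars.isspace (PySem.Chars.lstrip l).reverse with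
  | nil => exact absurd (by simp [hd]) h
  | cons y ys =>
    refine ⟨y, by simp, ?_⟩
    have h2 := List.head_dropWhile_not PySem.Chars.isspace
      (l := (PySem.Chars.lstrip l).reverse) (by simp [hd])
    simp only [hd] at h2
    simpa using h2

-- main equivalence on the some-case
lemma main_some (s : String) : validar_titulo (some s) = validar_titulo_alt (some s) := by
  simp only [validar_titulo, validar_titulo_alt]
  by_cases ht : PySem.Str.strip s = ""
  · simp [ht]
  · simp only [ht, if_neg, not_false_iff, decide_not]
    have htl : PySem.Chars.strip s.toList ≠ [] := by
      intro hnil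
      apply ht
      have h0 : (PySem.Str.strip s).toList = [] := by
        rw [PySem.Str.toList_strip]; exact hnil
      exact String.toList_inj.mp (by simpa using h0)
    obtain ⟨c, hcmem, hcns⟩ := exists_not_space_of_strip_ne_nil _ htl
    have hcsp : c ∉ [' '] := by
      intro hc
      apply hcns
      have : c = ' ' := by simpa using hc
      subst this
      decide
    obtain ⟨tok, htok, hctok⟩ := mem_splitOn [' '] (PySem.Chars.strip s.toList) c hcmem hcsp
    -- that token is a member of the ported token list and has positive stripped length
    have hsplit? : (PySem.Str.split? (PySem.Str.strip s) " ").getD []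
        = (PySem.Chars.splitOn (PySem.Chars.strip s.toList) [' ']).map String.ofList := by
      simp [PySem.Str.split?, PySem.Chars.split?, PySem.Str.toList_strip]
    have hmem' : String.ofList tok ∈ (PySem.Str.split? (PySem.Str.strip s) " ").getD [] := by
      rw [hsplit?]; exact List.mem_map_of_mem htok
    have hvalid : 0 < PySem.Str.len (PySem.Str.strip (String.ofList tok)) := by
      rw [PySem.Str.len_eq, PySem.Str.toList_strip]
      have : PySem.Chars.strip (String.ofList tok).toList ≠ [] := by
        intro hnil
        have hall := all_space_of_strip_nil _ (by simpa using hnil)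
        exact hcns (hall c (by simpa using hctok))
      have : 0 < (PySem.Chars.strip (String.ofList tok).toList).length :=
        List.length_pos_iff.mpr this
      exact_mod_cast this
    have := pvLoopA_pos _ _ hmem' hvalid
    simp [this]

-- ===== VERDICT (by name: the statement is the Claim_ definition above) =====
theorem validar_titulo_spec : Claim_equal_validar_titulo := by
  intro titulo _
  unfold Spec_validar_titulo
  cases titulo with
  | none => rfl
  | some s => exact main_some s
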